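-- pv_equiv track=rewrite | github.com/amandazhuyilan/Breakfast-Burrito | Algorithms/Heap.py | MaxHeapSort
-- ===== SOURCE A (Python) =====
-- def MaxHeapify(In_Arr, index):
-- 	largest = index
-- 	left = 2 * index + 1
-- 	right = 2 * index + 2
--
-- 	if left < len(In_Arr) and In_Arr[largest] < In_Arr[left]:
-- 		largest = left
-- 	if right < len(In_Arr) and In_Arr[largest] < In_Arr[right]:
-- 		largest = right
--
-- 	if largest != index:
-- 		In_Arr[index], In_Arr[largest] = In_Arr[largest], In_Arr[index]
-- 		MaxHeapify(In_Arr, largest)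
--
-- def MaxHeapSort(In_Arr):
-- 	N = len(In_Arr)
--
-- 	# build a max heap
-- 	for i in range(N//2, -1, -1):
-- 		MaxHeapify(In_Arr, i)
--
-- 	# putting the elements in descending order
-- 	for i in range(1, len(In_Arr), 2):
-- 		if In_Arr[i] < In_Arr[i + 1]:
-- 			In_Arr[i] , In_Arr[i + 1] = In_Arr[i + 1] , In_Arr[i]
--
-- 	return In_Arr
-- ===== SOURCE B (Python) =====
-- # Return-value re-implementation: A mutates In_Arr in place; B leaves it untouched and returns a new list.
-- def MaxHeapSort(In_Arr):
--     a = list(In_Arr)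
--     n = len(a)
--     # build a max heap with an iterative "hole" sift-down (lift a[i] out, shift larger
--     # children up, drop it back); index n//2 is skipped since it never has children
--     for i in range(n // 2 - 1, -1, -1):
--         v, cur = a[i], i
--         while True:
--             largest, top = cur, v
--             l, r = 2 * cur + 1, 2 * cur + 2
--             if l < n and top < a[l]:
--                 largest, top = l, a[l]
--             if r < n and top < a[r]:
--                 largest, top = r, a[r]
--             if largest == cur:
--                 break
--             a[cur] = a[largest]
--             cur = largest
--         a[cur] = v
--     # second phase: rebuild instead of swapping in place — keep a[0], then emit each
--     # following pair as (max, min); an unpaired trailing element is kept as is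
--     out = a[:1]
--     it = iter(a[1:])
--     for x in it:
--         y = next(it, None)
--         if y is None:
--             out.append(x)
--         else:
--             out.append(max(x, y))
--             out.append(min(x, y))
--     return out
-- ===== Notes on version B (the rewrite author's own statement) =====
-- stated objective: alternative
-- what changed: The recursive swap-based MaxHeapify is replaced by an iterative hole-style sift-down (shift larger children up, write the lifted value once at the end), and the buggy adjacent-pair pass is replaced by rebuilding the tail from (max,min) of each pair instead of swapping in place; B does not mutate In_Arr.
import Mathlib
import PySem

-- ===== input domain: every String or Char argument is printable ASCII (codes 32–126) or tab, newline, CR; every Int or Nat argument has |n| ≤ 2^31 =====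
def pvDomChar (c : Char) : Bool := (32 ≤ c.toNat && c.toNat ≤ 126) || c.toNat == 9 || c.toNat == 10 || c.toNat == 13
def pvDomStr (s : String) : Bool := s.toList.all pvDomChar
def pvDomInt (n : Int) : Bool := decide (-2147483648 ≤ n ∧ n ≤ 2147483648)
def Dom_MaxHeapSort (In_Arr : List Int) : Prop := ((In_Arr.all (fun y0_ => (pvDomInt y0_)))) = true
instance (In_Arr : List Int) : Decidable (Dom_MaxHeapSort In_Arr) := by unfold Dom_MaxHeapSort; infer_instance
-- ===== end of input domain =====

-- B replaces A's recursive swap-based MaxHeapify with an iterative hole-style sift-down and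
-- rebuilds the pair-fixed tail instead of swapping it in place (alternative decomposition).
-- Equivalence is about the RETURN value only: A mutates In_Arr in place, B leaves it untouched.

-- Python a[i]; exact wherever the index is guarded in range, as every use below is
def pvGet (a : List Int) (i : Nat) : Int := a.getD i 0

-- ===== PORT A =====
-- recursive MaxHeapify, literal; the fuel argument is only a structural-termination guard
-- (each recursive call strictly increases index below length, so fuel ≥ length - index suffices
-- and callers pass the list length)
def maxHeapifyA (fuel : Nat) (a : List Int) (index : Nat) : List Int :=
  match fuel with
  | 0 => a
  | fuel + 1 =>
    let l1 := if 2 * index + 1 < a.length ∧ pvGet a index < pvGet a (2 * index + 1) then 2 * index + 1 else index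
    let largest := if 2 * index + 2 < a.length ∧ pvGet a l1 < pvGet a (2 * index + 2) then 2 * index + 2 else l1
    if largest ≠ index then
      maxHeapifyA fuel ((a.set index (pvGet a largest)).set largest (pvGet a index)) largest
    else a

-- for i in range(N//2, -1, -1): MaxHeapify(In_Arr, i)
def buildA (fuel : Nat) (a : List Int) (i : Nat) : List Int :=
  match i with
  | 0 => maxHeapifyA fuel a 0
  | j + 1 => buildA fuel (maxHeapifyA fuel a (j + 1)) j

-- for i in range(1, len, 2): compare-and-swap In_Arr[i], In_Arr[i+1]; where i + 1 = len the
-- Python raises IndexError (excluded by Pre_) and the port just stops; fuel is a termination guard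
def pairA (fuel : Nat) (a : List Int) (i : Nat) : List Int :=
  match fuel with
  | 0 => a
  | fuel + 1 =>
    if i < a.length then
      if i + 1 < a.length then
        pairA fuel (if pvGet a i < pvGet a (i + 1)
               then (a.set i (pvGet a (i + 1))).set (i + 1) (pvGet a i) else a) (i + 2)
      else a
    else a

def MaxHeapSort (In_Arr : List Int) : List Int :=
  pairA In_Arr.length (buildA In_Arr.length In_Arr (In_Arr.length / 2)) 1

-- ===== PORT B =====
-- the while loop of B: iterative hole sift-down, (largest, top) is the running pair;
-- fuel is a termination guard as above, callers pass the list length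
def siftB (fuel : Nat) (a : List Int) (cur : Nat) (v : Int) : List Int :=
  match fuel with
  | 0 => a.set cur v
  | fuel + 1 =>
    let p1 := if 2 * cur + 1 < a.length ∧ v < pvGet a (2 * cur + 1)
              then (2 * cur + 1, pvGet a (2 * cur + 1)) else (cur, v)
    let p2 := if 2 * cur + 2 < a.length ∧ p1.2 < pvGet a (2 * cur + 2)
              then (2 * cur + 2, pvGet a (2 * cur + 2)) else p1
    if p2.1 ≠ cur then siftB fuel (a.set cur (pvGet a p2.1)) p2.1 v
    else a.set cur v

-- for i in range(n//2 - 1, -1, -1): buildB a k processes indices k-1 … 0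
def buildB (fuel : Nat) (a : List Int) (i : Nat) : List Int :=
  match i with
  | 0 => a
  | j + 1 => buildB fuel (siftB fuel a j (pvGet a j)) j

-- the pair loop: consume two elements at a time, emit max then min; a lone leftover is kept
def pairsB (t : List Int) : List Int :=
  match t with
  | x :: y :: rest => max x y :: min x y :: pairsB rest
  | t => t

def MaxHeapSort_alt (In_Arr : List Int) : List Int :=
  let a := buildB In_Arr.length In_Arr (In_Arr.length / 2)
  a.take 1 ++ pairsB (a.drop 1)

-- ===== PRECONDITION & SPEC =====
-- Pre_ excludes exactly the inputs on which Python A raises IndexError (its second loop reads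
-- In_Arr[len] whenever the length is even and ≥ 2); A returns normally on all other inputs.
def Pre_MaxHeapSort (In_Arr : List Int) : Prop := In_Arr.length % 2 = 1 ∨ In_Arr = []
instance (In_Arr : List Int) : Decidable (Pre_MaxHeapSort In_Arr) := by unfold Pre_MaxHeapSort; infer_instance
def pvWitness_MaxHeapSort : List Int := [3, 1, 2]

def Spec_MaxHeapSort (In_Arr : List Int) (out : List Int) : Prop := out = MaxHeapSort_alt In_Arr
instance (In_Arr : List Int) (out : List Int) : Decidable (Spec_MaxHeapSort In_Arr out) := by unfold Spec_MaxHeapSort; infer_instance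

-- ===== CLAIM (what is proved, stated in full; the proofs are below) =====
def Claim_equal_MaxHeapSort : Prop := ∀ (In_Arr : List Int), Dom_MaxHeapSort In_Arr → Pre_MaxHeapSort In_Arr → Spec_MaxHeapSort In_Arr (MaxHeapSort In_Arr)

-- ===== LEMMAS AND PROOFS =====

theorem set_pvGet_self (a : List Int) (i : Nat) : a.set i (pvGet a i) = a := by
  induction a generalizing i with
  | nil => simp
  | cons x t ih =>
    cases i with
    | zero => simp [pvGet]
    | succ j =>
      simp only [List.set, pvGet, List.getD, List.getElem?_cons_succ, List.cons.injEq, true_and]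
      exact ih j

theorem pvGet_set_ne (a : List Int) (i j : Nat) (w : Int) (h : i ≠ j) :
    pvGet (a.set i w) j = pvGet a j := by
  simp [pvGet, List.getD, List.getElem?_set_ne h]

theorem pvGet_set_self (a : List Int) (i : Nat) (w : Int) (h : i < a.length) :
    pvGet (a.set i w) i = w := by
  simp [pvGet, List.getD, h]

theorem pvGet_eq_getElem (a : List Int) (i : Nat) (h : i < a.length) : pvGet a i = a[i] := by
  simp [pvGet, List.getD, List.getElem?_eq_getElem h]

theorem length_siftB : ∀ (f : Nat) (a : List Int) (cur : Nat) (v : Int),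
    (siftB f a cur v).length = a.length := by
  intro f
  induction f with
  | zero => intro a cur v; simp [siftB]
  | succ f ih =>
    intro a cur v
    rw [siftB]
    split_ifs <;> simp [ih]

theorem length_heapify : ∀ (f : Nat) (a : List Int) (i : Nat),
    (maxHeapifyA f a i).length = a.length := by
  intro f
  induction f with
  | zero => intro a i; rw [maxHeapifyA]
  | succ f ih =>
    intro a i
    rw [maxHeapifyA]
    split_ifs <;> simp [ih]

theorem length_buildB : ∀ (i : Nat) (f : Nat) (a : List Int),
    (buildB f a i).length = a.length := by
  intro i
  induction i with
  | zero => intro f a; rw [buildB]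
  | succ j ih => intro f a; rw [buildB, ih, length_siftB]

theorem sift_set_cur : ∀ (f : Nat) (a : List Int) (cur : Nat) (w v : Int),
    siftB f (a.set cur w) cur v = siftB f a cur v := by
  intro f
  induction f with
  | zero => intro a cur w v; simp [siftB, List.set_set]
  | succ f ih =>
    intro a cur w v
    conv_lhs => rw [siftB]
    conv_rhs => rw [siftB]
    simp only [List.length_set, List.set_set,
      pvGet_set_ne a cur (2 * cur + 1) w (by omega),
      pvGet_set_ne a cur (2 * cur + 2) w (by omega)]
    by_cases h1 : 2 * cur + 1 < a.length ∧ v < pvGet a (2 * cur + 1)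
    · simp only [if_pos h1]
      by_cases h2 : 2 * cur + 2 < a.length ∧ pvGet a (2 * cur + 1) < pvGet a (2 * cur + 2)
      · simp only [if_pos h2]
        simp [pvGet_set_ne a cur (2 * cur + 2) w (by omega)]
      · simp only [if_neg h2]
        simp [pvGet_set_ne a cur (2 * cur + 1) w (by omega)]
    · simp only [if_neg h1]
      by_cases h2 : 2 * cur + 2 < a.length ∧ v < pvGet a (2 * cur + 2)
      · simp only [if_pos h2]
        simp [pvGet_set_ne a cur (2 * cur + 2) w (by omega)]
      · simp only [if_neg h2]
        simp

theorem heapify_eq_fuel : ∀ (f : Nat) (a : List Int) (i : Nat), a.length - i ≤ f →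
    maxHeapifyA f a i = siftB f a i (pvGet a i) := by
  intro f
  induction f with
  | zero =>
    intro a i h
    rw [maxHeapifyA, siftB, set_pvGet_self]
  | succ f ih =>
    intro a i h
    rw [maxHeapifyA, siftB]
    by_cases h1 : 2 * i + 1 < a.length ∧ pvGet a i < pvGet a (2 * i + 1)
    · simp only [if_pos h1]
      by_cases h2 : 2 * i + 2 < a.length ∧ pvGet a (2 * i + 1) < pvGet a (2 * i + 2)
      · simp only [if_pos h2, if_pos (show 2 * i + 2 ≠ i by omega)]
        rw [ih _ _ (by simp [List.length_set]; omega)]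
        rw [pvGet_set_self _ _ _ (by simp [List.length_set]; omega)]
        rw [sift_set_cur]
      · simp only [if_neg h2, if_pos (show 2 * i + 1 ≠ i by omega)]
        rw [ih _ _ (by simp [List.length_set]; omega)]
        rw [pvGet_set_self _ _ _ (by simp [List.length_set]; omega)]
        rw [sift_set_cur]
    · simp only [if_neg h1]
      by_cases h2 : 2 * i + 2 < a.length ∧ pvGet a i < pvGet a (2 * i + 2)
      · simp only [if_pos h2, if_pos (show 2 * i + 2 ≠ i by omega)]
        rw [ih _ _ (by simp [List.length_set]; omega)]
        rw [pvGet_set_self _ _ _ (by simp [List.length_set]; omega)]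
        rw [sift_set_cur]
      · simp only [if_neg h2]
        simp [set_pvGet_self]

theorem build_eq : ∀ (i : Nat) (f : Nat) (a : List Int), a.length ≤ f →
    buildA f a i = buildB f a (i + 1) := by
  intro i
  induction i with
  | zero =>
    intro f a h
    rw [buildA, buildB, buildB, heapify_eq_fuel _ _ _ (by omega)]
  | succ j ih =>
    intro f a h
    rw [buildA, buildB, ih _ _ (by rw [length_heapify]; omega),
      heapify_eq_fuel _ _ _ (by omega)]

theorem top_sift_noop : ∀ (f : Nat) (a : List Int),
    siftB f a (a.length / 2) (pvGet a (a.length / 2)) = a := by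
  intro f a
  cases f with
  | zero => rw [siftB, set_pvGet_self]
  | succ f =>
    rw [siftB]
    have h1 : ¬ (2 * (a.length / 2) + 1 < a.length ∧
        pvGet a (a.length / 2) < pvGet a (2 * (a.length / 2) + 1)) := by intro hc; omega
    have h2 : ¬ (2 * (a.length / 2) + 2 < a.length ∧
        pvGet a (a.length / 2) < pvGet a (2 * (a.length / 2) + 2)) := by intro hc; omega
    simp only [if_neg h1, if_neg h2]
    simp [set_pvGet_self]

theorem pairsB_nil : pairsB [] = [] := rfl
theorem pairsB_one (x : Int) : pairsB [x] = [x] := rfl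

theorem pairsB_short (t : List Int) (h : t.length ≤ 1) : pairsB t = t := by
  match t with
  | [] => exact pairsB_nil
  | [x] => exact pairsB_one x
  | x :: y :: r => simp at h

theorem pairsB_cons2 (x y : Int) (d : List Int) :
    pairsB (x :: y :: d) = max x y :: min x y :: pairsB d := by
  rw [pairsB]

theorem drop_i_decomp (a : List Int) (i : Nat) (h : i + 1 < a.length) :
    a.drop i = pvGet a i :: pvGet a (i + 1) :: a.drop (i + 2) := by
  rw [List.drop_eq_getElem_cons (by omega), List.drop_eq_getElem_cons (by omega)]
  rw [pvGet_eq_getElem _ _ (by omega), pvGet_eq_getElem _ _ (by omega)]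

theorem swap_decomp (a : List Int) (i : Nat) (x y : Int) (h : i + 1 < a.length) :
    (a.set i y).set (i + 1) x = a.take i ++ y :: x :: a.drop (i + 2) := by
  apply List.ext_getElem?
  intro j
  rcases Nat.lt_or_ge j i with hj | hj
  · rw [List.getElem?_set_ne (by omega), List.getElem?_set_ne (by omega)]
    rw [List.getElem?_append_left (by simp; try omega), List.getElem?_take_of_lt hj]
  · rcases Nat.lt_or_ge j (i + 1) with hj2 | hj2
    · have : j = i := by omega
      subst this
      rw [List.getElem?_set_ne (by omega), List.getElem?_set_self (by omega)]
      rw [List.getElem?_append_right (by simp; try omega)]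
      simp [Nat.min_eq_left (by omega : j ≤ a.length)]
    · rcases Nat.lt_or_ge j (i + 2) with hj3 | hj3
      · have : j = i + 1 := by omega
        subst this
        rw [List.getElem?_set_self (by simp; try omega)]
        rw [List.getElem?_append_right (by simp; try omega)]
        simp [Nat.min_eq_left (by omega : i ≤ a.length), show i + 1 - i = 1 by omega]
      · obtain ⟨k, rfl⟩ : ∃ k, j = i + 2 + k := ⟨j - (i + 2), by omega⟩
        rw [List.getElem?_set_ne (by omega), List.getElem?_set_ne (by omega)]
        rw [List.getElem?_append_right (by simp; try omega)]
        have hmin : min i a.length = i := Nat.min_eq_left (by omega)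
        simp only [List.length_take, hmin, show i + 2 + k - i = k + 2 by omega,
          List.getElem?_cons_succ, List.getElem?_drop]

theorem take_drop_pair (p : List Int) (u v : Int) (d : List Int) :
    (p ++ u :: v :: d).take (p.length + 2) = p ++ [u, v] ∧
    (p ++ u :: v :: d).drop (p.length + 2) = d := by
  induction p with
  | nil => simp
  | cons z t ih => simpa using ih

theorem pairA_eq_fuel : ∀ (f : Nat) (a : List Int) (i : Nat), a.length - i ≤ f →
    pairA f a i = a.take i ++ pairsB (a.drop i) := by
  intro f
  induction f with
  | zero =>
    intro a i h
    rw [pairA]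
    rw [List.take_of_length_le (by omega), List.drop_of_length_le (by omega)]
    simp [pairsB_nil]
  | succ f ih =>
    intro a i h
    by_cases hi : i < a.length
    · by_cases hi1 : i + 1 < a.length
      · rw [pairA]
        simp only [if_pos hi, if_pos hi1]
        have hp : (a.take i).length = i := by simp; omega
        by_cases hxy : pvGet a i < pvGet a (i + 1)
        · rw [if_pos hxy]
          rw [ih _ _ (by simp [List.length_set]; omega)]
          rw [swap_decomp a i (pvGet a i) (pvGet a (i + 1)) hi1]
          have h2 := take_drop_pair (a.take i) (pvGet a (i + 1)) (pvGet a i) (a.drop (i + 2))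
          rw [hp] at h2
          rw [h2.1, h2.2]
          rw [drop_i_decomp a i hi1, pairsB_cons2]
          rw [max_eq_right (le_of_lt hxy), min_eq_left (le_of_lt hxy)]
          simp
        · rw [if_neg hxy]
          rw [ih _ _ (by omega)]
          rw [drop_i_decomp a i hi1, pairsB_cons2]
          rw [max_eq_left (by omega), min_eq_right (by omega)]
          have hdecomp : a = a.take i ++ pvGet a i :: pvGet a (i + 1) :: a.drop (i + 2) := by
            conv_lhs => rw [← List.take_append_drop i a, drop_i_decomp a i hi1]
          have h2 := take_drop_pair (a.take i) (pvGet a i) (pvGet a (i + 1)) (a.drop (i + 2))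
          rw [hp] at h2
          conv_lhs => rw [hdecomp]
          rw [h2.1, h2.2]
          simp
      · rw [pairA]
        simp only [if_pos hi, if_neg hi1]
        rw [pairsB_short _ (by simp; omega), List.take_append_drop]
    · rw [pairA]
      simp only [if_neg hi]
      rw [List.take_of_length_le (by omega), List.drop_of_length_le (by omega)]
      simp [pairsB_nil]

theorem pairA_eq (f : Nat) (a : List Int) (i : Nat) (h : a.length - i ≤ f) :
    pairA f a i = a.take i ++ pairsB (a.drop i) :=
  pairA_eq_fuel f a i h

-- ===== VERDICT (by name: the statement is the Claim_ definition above) =====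
theorem MaxHeapSort_spec : Claim_equal_MaxHeapSort := by
  intro a _ _
  unfold Spec_MaxHeapSort MaxHeapSort MaxHeapSort_alt
  rw [build_eq _ _ _ le_rfl, buildB, top_sift_noop,
    pairA_eq _ _ _ (by rw [length_buildB]; omega)]
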